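-- pv_equiv track=rewrite | github.com/akmaljonpolatov8/password-strength-analyzer | src/utils.py | has_repeated_blocks
-- ===== SOURCE A (Python) =====
-- def has_repeated_blocks(password: str, block_length: int = 2) -> bool:
-- 	if len(password) < block_length * 2:
-- 		return False
-- 	seen = set()
-- 	for i in range(len(password) - block_length + 1):
-- 		block = password[i : i + block_length]
-- 		if block in seen:
-- 			return True
-- 		seen.add(block)
-- 	return False
-- ===== SOURCE B (Python) =====
-- def has_repeated_blocks(password: str, block_length: int = 2) -> bool:
-- 	if len(password) < block_length * 2:
-- 		return False
-- 	for i in range(len(password) - block_length + 1):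
-- 		block = password[i : i + block_length]
-- 		for j in range(i):
-- 			if password[j : j + block_length] == block:
-- 				return True
-- 	return False
-- ===== Notes on version B (the rewrite author's own statement) =====
-- stated objective: alternative
-- what changed: Replaces A's single pass with a growing membership set by a nested pairwise scan that compares each window against every earlier window with an early return; no set is maintained (same 2k guard verbatim).
import Mathlib
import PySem

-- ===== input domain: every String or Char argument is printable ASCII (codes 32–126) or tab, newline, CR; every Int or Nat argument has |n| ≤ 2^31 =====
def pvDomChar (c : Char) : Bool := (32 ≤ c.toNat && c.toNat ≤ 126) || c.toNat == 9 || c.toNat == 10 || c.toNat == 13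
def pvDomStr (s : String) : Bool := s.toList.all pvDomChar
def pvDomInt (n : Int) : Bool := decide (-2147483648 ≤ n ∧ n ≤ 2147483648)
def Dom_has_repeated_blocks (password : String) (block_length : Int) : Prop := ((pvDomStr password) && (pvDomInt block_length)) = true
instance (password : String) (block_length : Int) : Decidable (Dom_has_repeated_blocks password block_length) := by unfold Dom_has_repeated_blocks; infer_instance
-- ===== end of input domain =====

-- B replaces A's single pass with a growing membership set by a nested pairwise scan that
-- compares each window against every earlier window (no set is maintained); same 2k guard, same result.

-- ===== PORT A =====
-- A's 'for i in range(len(password) - block_length + 1)' with an early return and a growing set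
-- 'seen'; the lazy range is transliterated as fuel = number of remaining iterations plus the
-- current index p (i = 0, 1, … exactly as Python's range yields them).
def hrbLoopA (cs : List Char) (k : Int) : Nat → Nat → PySem.Set (List Char) → Bool
  | 0, _, _ => false
  | n + 1, p, seen =>
    let block := PySem.List.slice cs (some (p : Int)) (some ((p : Int) + k))
    if PySem.Set.contains seen block then true
    else hrbLoopA cs k n (p + 1) (seen.add block)

def has_repeated_blocks (password : String) (block_length : Int) : Bool :=
  if (password.toList.length : Int) < block_length * 2 then false
  else hrbLoopA password.toList block_length
    ((password.toList.length : Int) - block_length + 1).toNat 0 PySem.Set.empty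

-- ===== PORT B =====
-- B's inner 'for j in range(i)' comparing password[j:j+block_length] with the current block.
def hrbInnerB (cs : List Char) (k : Int) (block : List Char) : Nat → Nat → Bool
  | 0, _ => false
  | c + 1, j =>
    if PySem.List.slice cs (some (j : Int)) (some ((j : Int) + k)) = block then true
    else hrbInnerB cs k block c (j + 1)

-- B's outer 'for i in range(len(password) - block_length + 1)' with an early return.
def hrbOuterB (cs : List Char) (k : Int) : Nat → Nat → Bool
  | 0, _ => false
  | n + 1, p =>
    let block := PySem.List.slice cs (some (p : Int)) (some ((p : Int) + k))
    if hrbInnerB cs k block p 0 then true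
    else hrbOuterB cs k n (p + 1)

def has_repeated_blocks_alt (password : String) (block_length : Int) : Bool :=
  if (password.toList.length : Int) < block_length * 2 then false
  else hrbOuterB password.toList block_length
    ((password.toList.length : Int) - block_length + 1).toNat 0

-- ===== PRECONDITION & SPEC =====
def Spec_has_repeated_blocks (password : String) (block_length : Int) (out : Bool) : Prop := out = has_repeated_blocks_alt password block_length
instance (password : String) (block_length : Int) (out : Bool) : Decidable (Spec_has_repeated_blocks password block_length out) := by unfold Spec_has_repeated_blocks; infer_instance

-- ===== CLAIM (what is proved, stated in full; the proofs are below) =====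
def Claim_equal_has_repeated_blocks : Prop := ∀ (password : String) (block_length : Int), Dom_has_repeated_blocks password block_length → Spec_has_repeated_blocks password block_length (has_repeated_blocks password block_length)

-- ===== LEMMAS AND PROOFS =====

-- The window starting at position j (proof-side abbreviation).
def pvWin (cs : List Char) (k : Int) (j : Nat) : List Char :=
  PySem.List.slice cs (some (j : Int)) (some ((j : Int) + k))

-- A's loop detects: a repeat among the remaining windows, or a remaining window already in 'seen'.
theorem hrbLoopA_eq (cs : List Char) (k : Int) :
    ∀ (n p : Nat) (seen : PySem.Set (List Char)),
      hrbLoopA cs k n p seen =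
        decide (¬ ((List.range n).map (fun t => pvWin cs k (p + t))).Nodup ∨
                ∃ t < n, pvWin cs k (p + t) ∈ seen) := by
  intro n
  induction n with
  | zero => intro p seen; simp [hrbLoopA]
  | succ n ih =>
    intro p seen
    have hcons : (List.range (n + 1)).map (fun t => pvWin cs k (p + t)) =
        pvWin cs k p :: (List.range n).map (fun t => pvWin cs k ((p + 1) + t)) := by
      rw [List.range_succ_eq_map, List.map_cons, List.map_map]
      refine congrArg₂ _ (by simp) (List.map_congr_left ?_)
      intro t _
      show pvWin cs k (p + (t + 1)) = pvWin cs k ((p + 1) + t)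
      rw [show p + (t + 1) = (p + 1) + t from by omega]
    simp only [hrbLoopA]
    by_cases h : pvWin cs k p ∈ seen
    · rw [if_pos (by simpa [PySem.Set.contains, pvWin] using h)]
      have hex : ∃ t < n + 1, pvWin cs k (p + t) ∈ seen := ⟨0, Nat.succ_pos n, h⟩
      exact (decide_eq_true (Or.inr hex)).symm
    · rw [if_neg (by simpa [PySem.Set.contains, pvWin] using h), ih, hcons, decide_eq_decide,
        List.nodup_cons]
      simp only [List.mem_map, List.mem_range, PySem.Set.mem_add, not_and_or, not_not]
      constructor
      · rintro (hnd | ⟨t, ht, hs | heq⟩)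
        · exact Or.inl (Or.inr hnd)
        · exact Or.inr ⟨t + 1, by omega, by rw [show p + (t + 1) = (p + 1) + t from by omega]; exact hs⟩
        · exact Or.inl (Or.inl ⟨t, ht, heq⟩)
      · rintro ((⟨t, ht, hte⟩ | hnd) | ⟨t, ht, hs⟩)
        · exact Or.inr ⟨t, ht, Or.inr hte⟩
        · exact Or.inl hnd
        · match t, ht, hs with
          | 0, _, hs => exact absurd hs h
          | t + 1, ht, hs =>
            exact Or.inr ⟨t, by omega, Or.inl (by rw [show (p + 1) + t = p + (t + 1) from by omega]; exact hs)⟩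

-- B's inner loop: some window at j, j+1, …, j+c-1 equals 'block'.
theorem hrbInnerB_eq (cs : List Char) (k : Int) (block : List Char) :
    ∀ (c j : Nat), hrbInnerB cs k block c j = decide (∃ t < c, pvWin cs k (j + t) = block) := by
  intro c
  induction c with
  | zero => intro j; simp [hrbInnerB]
  | succ c ih =>
    intro j
    simp only [hrbInnerB]
    by_cases h : PySem.List.slice cs (some (j : Int)) (some ((j : Int) + k)) = block
    · rw [if_pos h]
      have hex : ∃ t < c + 1, pvWin cs k (j + t) = block := ⟨0, Nat.succ_pos c, h⟩
      exact (decide_eq_true hex).symm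
    · rw [if_neg h, ih, decide_eq_decide]
      constructor
      · rintro ⟨t, ht, hte⟩
        exact ⟨t + 1, by omega, by rw [show j + (t + 1) = (j + 1) + t from by omega]; exact hte⟩
      · rintro ⟨t, ht, hte⟩
        match t, ht, hte with
        | 0, _, hte => exact absurd hte h
        | t + 1, ht, hte =>
          exact ⟨t, by omega, by rw [show (j + 1) + t = j + (t + 1) from by omega]; exact hte⟩

-- B's outer loop: some remaining window repeats an earlier (absolute) window.
theorem hrbOuterB_eq (cs : List Char) (k : Int) :
    ∀ (n p : Nat), hrbOuterB cs k n p =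
      decide (∃ t < n, ∃ j < p + t, pvWin cs k j = pvWin cs k (p + t)) := by
  intro n
  induction n with
  | zero => intro p; simp [hrbOuterB]
  | succ n ih =>
    intro p
    simp only [hrbOuterB]
    by_cases h : hrbInnerB cs k (PySem.List.slice cs (some (p : Int)) (some ((p : Int) + k))) p 0 = true
    · rw [if_pos h]
      rw [hrbInnerB_eq] at h
      obtain ⟨t, ht, hte⟩ := of_decide_eq_true h
      have hex : ∃ t' < n + 1, ∃ j < p + t', pvWin cs k j = pvWin cs k (p + t') :=
        ⟨0, Nat.succ_pos n, t, by omega, by rw [show t = 0 + t from by omega]; exact hte⟩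
      exact (decide_eq_true hex).symm
    · rw [if_neg h, ih, decide_eq_decide]
      rw [hrbInnerB_eq] at h
      have hno : ¬ ∃ t < p, pvWin cs k (0 + t) = pvWin cs k p := fun hc => h (decide_eq_true hc)
      constructor
      · rintro ⟨t, ht, j, hj, hje⟩
        exact ⟨t + 1, by omega, j, by omega, by rw [show p + (t + 1) = (p + 1) + t from by omega]; exact hje⟩
      · rintro ⟨t, ht, j, hj, hje⟩
        match t, ht, hj, hje with
        | 0, _, hj, hje =>
          exact absurd ⟨j, by omega, by rw [show 0 + j = j from by omega]; exact hje⟩ hno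
        | t + 1, ht, hj, hje =>
          exact ⟨t, by omega, j, by omega, by rw [show (p + 1) + t = p + (t + 1) from by omega]; exact hje⟩

-- A window list has a repeat iff some window equals a strictly earlier one.
theorem not_nodup_map_range_iff (f : Nat → List Char) (m : Nat) :
    (¬ ((List.range m).map f).Nodup) ↔ ∃ i < m, ∃ j < i, f j = f i := by
  rw [List.Nodup, List.pairwise_map, List.pairwise_iff_getElem]
  simp only [List.length_range, List.getElem_range]
  constructor
  · intro hnp
    push Not at hnp
    obtain ⟨j, i, hj, hi, hji, he⟩ := hnp
    exact ⟨i, hi, j, hji, he⟩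
  · rintro ⟨i, hi, j, hji, he⟩ hp
    exact hp j i (by omega) hi hji he

-- ===== VERDICT (by name: the statement is the Claim_ definition above) =====
theorem has_repeated_blocks_spec : Claim_equal_has_repeated_blocks := by
  intro password block_length _
  unfold Spec_has_repeated_blocks has_repeated_blocks has_repeated_blocks_alt
  by_cases hg : ((password.toList.length : Int) < block_length * 2)
  · rw [if_pos hg, if_pos hg]
  · rw [if_neg hg, if_neg hg, hrbLoopA_eq, hrbOuterB_eq, decide_eq_decide]
    rw [not_nodup_map_range_iff (fun t => pvWin password.toList block_length (0 + t))]
    simp [PySem.Set.empty]
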